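-- pv_equiv track=rewrite | github.com/raederhans/scenario-forge | tools/i18n_audit.py | sanitize_template_literal
-- ===== SOURCE A (Python) =====
-- def sanitize_template_literal(text: str, placeholder: str = "{expr}") -> str:
--     result = []
--     index = 0
--     length = len(text)
--     while index < length:
--         if text[index] == "$" and index + 1 < length and text[index + 1] == "{":
--             depth = 1
--             index += 2
--             while index < length and depth > 0:
--                 char = text[index]
--                 if char == "{":
--                     depth += 1
--                 elif char == "}":
--                     depth -= 1
--                 index += 1
--             result.append(placeholder)
--             continue
--         result.append(text[index])
--         index += 1
--     return "".join(result)
-- ===== SOURCE B (Python) =====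
-- def sanitize_template_literal(text: str, placeholder: str = "{expr}") -> str:
--     parts = []
--     pos = 0
--     n = len(text)
--     while True:
--         start = text.find("${", pos)
--         if start == -1:
--             parts.append(text[pos:])
--             break
--         parts.append(text[pos:start])
--         parts.append(placeholder)
--         end = start + 2
--         depth = 1
--         while end < n and depth > 0:
--             c = text[end]
--             if c == "{":
--                 depth += 1
--             elif c == "}":
--                 depth -= 1
--             end += 1
--         pos = end
--     return "".join(parts)
-- ===== Notes on version B (the rewrite author's own statement) =====
-- stated objective: alternative
-- what changed: Replaced A's per-character outer scan (appending one char at a time) with find-driven chunking: locate the next "${" with str.find and copy the literal text before it as one bulk slice.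
import Mathlib
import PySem

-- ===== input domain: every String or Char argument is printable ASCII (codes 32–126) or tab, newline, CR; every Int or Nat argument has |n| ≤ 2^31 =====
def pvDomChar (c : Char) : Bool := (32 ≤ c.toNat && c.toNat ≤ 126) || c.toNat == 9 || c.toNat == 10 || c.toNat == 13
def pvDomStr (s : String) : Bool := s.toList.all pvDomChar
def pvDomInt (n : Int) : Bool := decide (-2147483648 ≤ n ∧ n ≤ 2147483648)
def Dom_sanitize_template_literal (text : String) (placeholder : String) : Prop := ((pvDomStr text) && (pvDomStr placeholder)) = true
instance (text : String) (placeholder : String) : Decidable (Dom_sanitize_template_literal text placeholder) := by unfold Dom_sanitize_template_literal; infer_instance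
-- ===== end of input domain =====

-- B replaces A's per-character outer scan with str.find-driven chunking: locate the next "${"
-- and copy the literal text before it as one bulk slice (objective: alternative decomposition).
-- Loops are ported with an explicit fuel parameter that is a plain totalisation guard: the
-- entry points pass enough fuel that the zero-fuel branch is never reached.

-- ===== PORT A =====
-- inner 'while index < length and depth > 0' loop of A; returns the final index
def aInner (cs : List Char) (length : Nat) : Nat → Nat → Int → Nat
  | 0, index, _ => index
  | fuel + 1, index, depth =>
    if index < length ∧ depth > 0 then
      aInner cs length fuel (index + 1)
        (if cs.getD index ' ' = '{' then depth + 1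
         else if cs.getD index ' ' = '}' then depth - 1 else depth)
    else index

-- outer 'while index < length' loop of A, accumulating the joined result
def aMain (cs ph : List Char) (length : Nat) : Nat → Nat → List Char → List Char
  | 0, _, result => result
  | fuel + 1, index, result =>
    if index < length then
      if cs.getD index ' ' = '$' ∧ index + 1 < length ∧ cs.getD (index + 1) ' ' = '{' then
        aMain cs ph length fuel (aInner cs length length (index + 2) 1) (result ++ ph)
      else
        aMain cs ph length fuel (index + 1) (result ++ [cs.getD index ' '])
    else result

def sanitize_template_literal (text : String) (placeholder : String) : String :=
  String.ofList (aMain text.toList placeholder.toList text.toList.length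
    text.toList.length 0 [])

-- ===== PORT B =====
-- exact port of text.find("${", pos): first i ≥ pos with text[i] = '$', text[i+1] = '{' (none = -1)
def bFind (cs : List Char) (length : Nat) : Nat → Nat → Option Nat
  | 0, _ => none
  | fuel + 1, pos =>
    if pos < length then
      if cs.getD pos ' ' = '$' ∧ pos + 1 < length ∧ cs.getD (pos + 1) ' ' = '{' then some pos
      else bFind cs length fuel (pos + 1)
    else none

-- B's 'while end < n and depth > 0' brace-matching loop; returns the final end position
def bMatch (cs : List Char) (length : Nat) : Nat → Nat → Int → Nat
  | 0, e, _ => e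
  | fuel + 1, e, depth =>
    if e < length ∧ depth > 0 then
      bMatch cs length fuel (e + 1)
        (if cs.getD e ' ' = '{' then depth + 1
         else if cs.getD e ' ' = '}' then depth - 1 else depth)
    else e

-- B's 'while True' loop: chunked copy up to the next "${", then the placeholder
def bMain (cs ph : List Char) (length : Nat) : Nat → Nat → List Char → List Char
  | 0, pos, parts => parts ++ cs.drop pos
  | fuel + 1, pos, parts =>
    match bFind cs length length pos with
    | none => parts ++ cs.drop pos          -- text[pos:]
    | some start =>
        bMain cs ph length fuel (bMatch cs length length (start + 2) 1)
          (parts ++ (cs.drop pos).take (start - pos) ++ ph)   -- text[pos:start] ++ placeholder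

def sanitize_template_literal_alt (text : String) (placeholder : String) : String :=
  String.ofList (bMain text.toList placeholder.toList text.toList.length
    (text.toList.length + 1) 0 [])

-- ===== PRECONDITION & SPEC =====
def Spec_sanitize_template_literal (text : String) (placeholder : String) (out : String) : Prop := out = sanitize_template_literal_alt text placeholder
instance (text : String) (placeholder : String) (out : String) : Decidable (Spec_sanitize_template_literal text placeholder out) := by unfold Spec_sanitize_template_literal; infer_instance

-- ===== CLAIM (what is proved, stated in full; the proofs are below) =====
def Claim_equal_sanitize_template_literal : Prop := ∀ (text : String) (placeholder : String), Dom_sanitize_template_literal text placeholder → Spec_sanitize_template_literal text placeholder (sanitize_template_literal text placeholder)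

-- ===== LEMMAS AND PROOFS =====

theorem aInner_ge (cs : List Char) (L : Nat) :
    ∀ fuel index depth, index ≤ aInner cs L fuel index depth := by
  intro fuel
  induction fuel with
  | zero => intro index depth; simp [aInner]
  | succ fuel ih =>
      intro index depth
      rw [aInner]
      split
      · exact le_trans (by omega) (ih (index + 1) _)
      · exact le_refl _

theorem inner_eq (cs : List Char) (L : Nat) :
    ∀ fuel e depth, aInner cs L fuel e depth = bMatch cs L fuel e depth := by
  intro fuel
  induction fuel with
  | zero => intro e depth; simp [aInner, bMatch]
  | succ fuel ih =>
      intro e depth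
      rw [aInner, bMatch]
      split
      · exact ih (e + 1) _
      · rfl

theorem bMatch_ge (cs : List Char) (L : Nat) :
    ∀ fuel e depth, e ≤ bMatch cs L fuel e depth := by
  intro fuel e depth
  rw [← inner_eq]
  exact aInner_ge cs L fuel e depth

theorem bFind_some (cs : List Char) (L : Nat) :
    ∀ fuel pos i, bFind cs L fuel pos = some i → pos ≤ i ∧ i < L := by
  intro fuel
  induction fuel with
  | zero => intro pos i h; simp [bFind] at h
  | succ fuel ih =>
      intro pos i h
      rw [bFind] at h
      by_cases hp : pos < L
      · rw [if_pos hp] at h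
        by_cases hm : cs.getD pos ' ' = '$' ∧ pos + 1 < L ∧ cs.getD (pos + 1) ' ' = '{'
        · rw [if_pos hm] at h; cases h; omega
        · rw [if_neg hm] at h
          have := ih (pos + 1) i h; omega
      · rw [if_neg hp] at h; cases h

theorem bFind_none_of_ge (cs : List Char) (L : Nat) :
    ∀ fuel pos, L ≤ pos → bFind cs L fuel pos = none := by
  intro fuel pos h
  cases fuel with
  | zero => rfl
  | succ fuel => rw [bFind, if_neg (by omega)]

theorem bFind_fuel (cs : List Char) (L : Nat) :
    ∀ f₁ f₂ pos, L ≤ f₁ + pos → L ≤ f₂ + pos → bFind cs L f₁ pos = bFind cs L f₂ pos := by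
  intro f₁
  induction f₁ with
  | zero =>
      intro f₂ pos h1 _
      rw [bFind_none_of_ge cs L 0 pos (by omega), bFind_none_of_ge cs L f₂ pos (by omega)]
  | succ f₁ ih =>
      intro f₂ pos h1 h2
      by_cases hp : pos < L
      · cases f₂ with
        | zero => omega
        | succ f₂ =>
            rw [bFind, bFind, if_pos hp, if_pos hp]
            by_cases hm : cs.getD pos ' ' = '$' ∧ pos + 1 < L ∧ cs.getD (pos + 1) ' ' = '{'
            · rw [if_pos hm, if_pos hm]
            · rw [if_neg hm, if_neg hm]
              exact ih f₂ (pos + 1) (by omega) (by omega)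
      · rw [bFind_none_of_ge cs L _ pos (by omega), bFind_none_of_ge cs L f₂ pos (by omega)]

theorem bFind_marker (cs : List Char) (L : Nat) (fuel pos : Nat) (hf : 0 < fuel)
    (hp : pos < L)
    (hm : cs.getD pos ' ' = '$' ∧ pos + 1 < L ∧ cs.getD (pos + 1) ' ' = '{') :
    bFind cs L fuel pos = some pos := by
  cases fuel with
  | zero => omega
  | succ fuel => rw [bFind, if_pos hp, if_pos hm]

theorem bMain_succ_none (cs ph : List Char) (L f pos : Nat) (parts : List Char)
    (h : bFind cs L L pos = none) :
    bMain cs ph L (f + 1) pos parts = parts ++ cs.drop pos := by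
  rw [bMain, h]

theorem bMain_succ_some (cs ph : List Char) (L f pos start : Nat) (parts : List Char)
    (h : bFind cs L L pos = some start) :
    bMain cs ph L (f + 1) pos parts
      = bMain cs ph L f (bMatch cs L L (start + 2) 1)
          (parts ++ (cs.drop pos).take (start - pos) ++ ph) := by
  rw [bMain, h]

-- bMain returns the same value for any two sufficient fuels
theorem bMain_fuel (cs ph : List Char) (L : Nat) :
    ∀ f₁ f₂ pos parts, L ≤ f₁ + pos → L ≤ f₂ + pos →
      bMain cs ph L f₁ pos parts = bMain cs ph L f₂ pos parts := by
  intro f₁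
  induction f₁ with
  | zero =>
      intro f₂ pos parts h1 _
      cases f₂ with
      | zero => rfl
      | succ f₂ =>
          rw [bMain_succ_none cs ph L f₂ pos parts (bFind_none_of_ge cs L L pos (by omega)), bMain]
  | succ f₁ ih =>
      intro f₂ pos parts h1 h2
      cases f₂ with
      | zero =>
          rw [bMain_succ_none cs ph L f₁ pos parts (bFind_none_of_ge cs L L pos (by omega)), bMain]
      | succ f₂ =>
          cases hs : bFind cs L L pos with
          | none =>
              rw [bMain_succ_none cs ph L f₁ pos parts hs, bMain_succ_none cs ph L f₂ pos parts hs]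
          | some start =>
              have h3 := bFind_some cs L L pos start hs
              have h4 := bMatch_ge cs L L (start + 2) 1
              rw [bMain_succ_some cs ph L f₁ pos start parts hs,
                bMain_succ_some cs ph L f₂ pos start parts hs]
              exact ih f₂ (bMatch cs L L (start + 2) 1) _ (by omega) (by omega)

-- advancing past one non-marker character equals carrying it into the pending chunk
theorem bMain_advance (cs ph : List Char) (f pos : Nat) (parts : List Char)
    (hpos : pos < cs.length)
    (hno : ¬(cs.getD pos ' ' = '$' ∧ pos + 1 < cs.length ∧ cs.getD (pos + 1) ' ' = '{')) :
    bMain cs ph cs.length (f + 1) pos parts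
      = bMain cs ph cs.length (f + 1) (pos + 1) (parts ++ [cs.getD pos ' ']) := by
  obtain ⟨k, hk⟩ : ∃ k, cs.length = k + 1 := ⟨cs.length - 1, by omega⟩
  have hdrop : cs.drop pos = cs.getD pos ' ' :: cs.drop (pos + 1) := by
    rw [List.getD_eq_getElem cs ' ' hpos]
    exact List.drop_eq_getElem_cons hpos
  rw [hk] at hpos hno ⊢
  have hfind : bFind cs (k + 1) (k + 1) pos = bFind cs (k + 1) (k + 1) (pos + 1) := by
    conv_lhs => rw [bFind]
    rw [if_pos hpos, if_neg hno]
    exact bFind_fuel cs (k + 1) k (k + 1) (pos + 1) (by omega) (by omega)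
  cases hs : bFind cs (k + 1) (k + 1) (pos + 1) with
  | none =>
      rw [bMain_succ_none cs ph (k + 1) f pos parts (hfind.trans hs),
        bMain_succ_none cs ph (k + 1) f (pos + 1) _ hs, hdrop]
      simp
  | some start =>
      have hge := bFind_some cs (k + 1) (k + 1) (pos + 1) start hs
      rw [bMain_succ_some cs ph (k + 1) f pos start parts (hfind.trans hs),
        bMain_succ_some cs ph (k + 1) f (pos + 1) start _ hs, hdrop,
        show start - pos = (start - (pos + 1)) + 1 by omega, List.take_succ_cons]
      simp

theorem main_eq (cs ph : List Char) :
    ∀ fuel pos result, cs.length ≤ fuel + pos →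
      aMain cs ph cs.length fuel pos result
        = bMain cs ph cs.length (cs.length + 1) pos result := by
  intro fuel
  induction fuel with
  | zero =>
      intro pos result h
      rw [aMain, bMain_succ_none cs ph cs.length cs.length pos result
          (bFind_none_of_ge cs cs.length cs.length pos (by omega)),
        List.drop_of_length_le (by omega)]
      simp
  | succ fuel ih =>
      intro pos result h
      by_cases hlt : pos < cs.length
      · by_cases hm : cs.getD pos ' ' = '$' ∧ pos + 1 < cs.length ∧ cs.getD (pos + 1) ' ' = '{'
        · have hj := aInner_ge cs cs.length cs.length (pos + 2) 1
          rw [aMain, if_pos hlt, if_pos hm,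
            ih (aInner cs cs.length cs.length (pos + 2) 1) (result ++ ph) (by omega),
            bMain_succ_some cs ph cs.length cs.length pos pos result
              (bFind_marker cs cs.length cs.length pos (by omega) hlt hm),
            ← inner_eq,
            bMain_fuel cs ph cs.length cs.length (cs.length + 1)
              (aInner cs cs.length cs.length (pos + 2) 1) _ (by omega) (by omega)]
          congr 2
          simp
        · rw [aMain, if_pos hlt, if_neg hm,
            ih (pos + 1) (result ++ [cs.getD pos ' ']) (by omega),
            ← bMain_advance cs ph cs.length pos result hlt hm]
      · rw [aMain, if_neg hlt,
          bMain_succ_none cs ph cs.length cs.length pos result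
            (bFind_none_of_ge cs cs.length cs.length pos (by omega)),
          List.drop_of_length_le (by omega)]
        simp

-- ===== VERDICT (by name: the statement is the Claim_ definition above) =====
theorem sanitize_template_literal_spec : Claim_equal_sanitize_template_literal := by
  intro text placeholder _
  unfold Spec_sanitize_template_literal sanitize_template_literal sanitize_template_literal_alt
  rw [main_eq text.toList placeholder.toList text.toList.length 0 [] (by omega)]
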